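-- pv_equiv track=rewrite | github.com/VerbalAid/Medical_Justifications_Human_vs_LLM_-Corpus_Linguistics- | pipeline/branch_pairs.py | ancestor_closure
-- ===== SOURCE A (Python) =====
-- def ancestor_closure(
--     concept: str, parents: dict[str, list[str]]
-- ) -> frozenset[str]:
--     """All concepts reachable upward from concept (including itself)."""
--     out: set[str] = set()
--     stack = [concept]
--     while stack:
--         n = stack.pop()
--         if n in out:
--             continue
--         out.add(n)
--         for p in parents.get(n, []):
--             stack.append(p)
--     return frozenset(out)
-- ===== SOURCE B (Python) =====
-- def ancestor_closure(
--     concept: str, parents: dict[str, list[str]]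
-- ) -> frozenset[str]:
--     """All concepts reachable upward from concept (including itself)."""
--     out = {concept}
--     while True:
--         nxt = out | {p for n in out for p in parents.get(n, [])}
--         if nxt == out:
--             return frozenset(out)
--         out = nxt
-- ===== Notes on version B (the rewrite author's own statement) =====
-- stated objective: alternative
-- what changed: Replaces the explicit-stack DFS worklist with round-based fixpoint saturation: repeatedly union in the parents of every current member until the set stops growing.
import Mathlib
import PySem

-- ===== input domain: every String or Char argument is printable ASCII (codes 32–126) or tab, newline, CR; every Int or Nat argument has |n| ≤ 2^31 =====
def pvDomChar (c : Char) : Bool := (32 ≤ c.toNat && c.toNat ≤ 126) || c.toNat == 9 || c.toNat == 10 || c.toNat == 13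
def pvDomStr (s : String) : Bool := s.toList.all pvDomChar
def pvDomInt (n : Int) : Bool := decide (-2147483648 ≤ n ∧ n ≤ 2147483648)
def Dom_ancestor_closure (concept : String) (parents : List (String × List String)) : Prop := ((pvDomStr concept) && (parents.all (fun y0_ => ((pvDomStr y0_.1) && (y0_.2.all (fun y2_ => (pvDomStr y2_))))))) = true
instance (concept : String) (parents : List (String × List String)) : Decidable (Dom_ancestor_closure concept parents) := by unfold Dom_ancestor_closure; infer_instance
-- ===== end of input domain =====

-- B replaces A's explicit-stack DFS by round-based fixpoint saturation; same returned frozenset,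
-- which (being unordered in Python) both ports enumerate in sorted order.

-- parents.get(n, []) on the association list (first match), shared by both ports
def pvGetPar (parents : List (String × List String)) (n : String) : List String :=
  match parents with
  | [] => []
  | (k, vs) :: rest => if k == n then vs else pvGetPar rest n

-- ===== PORT A =====
-- A's while-loop: pop n from the stack top, skip if already in out, else add it and push its parents.
-- The Nat argument is pure fuel (a totality guard, never exhausted); stack top = list head, so the
-- in-order appends of 'for p in parents.get(n, []): stack.append(p)' prepend reversed.
def ancestor_closureLoop (parents : List (String × List String)) :
    Nat → PySem.Set String → List String → PySem.Set String
  | 0, out, _ => out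
  | _ + 1, out, [] => out
  | fuel + 1, out, n :: rest =>
    if PySem.Set.contains out n then
      ancestor_closureLoop parents fuel out rest
    else
      ancestor_closureLoop parents fuel (PySem.Set.add out n) ((pvGetPar parents n).reverse ++ rest)

def ancestor_closure (concept : String) (parents : List (String × List String)) : List String :=
  PySem.List.sorted
    (ancestor_closureLoop parents ((parents.map (fun kv => kv.2.length)).sum + 2)
      PySem.Set.empty [concept])
    (fun x => x) false

-- ===== PORT B =====
-- one saturation round of B: out | {p for n in out for p in parents.get(n, [])}
def pvStep (parents : List (String × List String)) (out : PySem.Set String) : PySem.Set String :=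
  PySem.Set.union out (PySem.Set.ofList (out.flatMap (fun n => pvGetPar parents n)))

-- B's 'while True': iterate pvStep until nxt == out; the Nat argument is pure fuel (never exhausted)
def ancestor_closureFix (parents : List (String × List String)) :
    Nat → PySem.Set String → PySem.Set String
  | 0, out => out
  | fuel + 1, out =>
    let nxt := pvStep parents out
    if PySem.Set.equal nxt out then out else ancestor_closureFix parents fuel nxt

def ancestor_closure_alt (concept : String) (parents : List (String × List String)) : List String :=
  PySem.List.sorted
    (ancestor_closureFix parents (concept :: parents.flatMap (fun kv => kv.2)).length
      (PySem.Set.add PySem.Set.empty concept))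
    (fun x => x) false

-- ===== PRECONDITION & SPEC =====
def Spec_ancestor_closure (concept : String) (parents : List (String × List String)) (out : List String) : Prop := out = ancestor_closure_alt concept parents
instance (concept : String) (parents : List (String × List String)) (out : List String) : Decidable (Spec_ancestor_closure concept parents out) := by unfold Spec_ancestor_closure; infer_instance

-- ===== CLAIM (what is proved, stated in full; the proofs are below) =====
def Claim_equal_ancestor_closure : Prop := ∀ (concept : String) (parents : List (String × List String)), Dom_ancestor_closure concept parents → Spec_ancestor_closure concept parents (ancestor_closure concept parents)

-- ===== LEMMAS AND PROOFS =====

-- S is closed under the parent relation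
def pvClosed (parents : List (String × List String)) (S : List String) : Prop :=
  ∀ n ∈ S, ∀ p ∈ pvGetPar parents n, p ∈ S

-- remaining potential of A's loop: total parent-list length over unvisited keys
def pvRem (parents : List (String × List String)) (out : PySem.Set String) : Nat :=
  ((parents.filter (fun kv => !(PySem.Set.contains out kv.1))).map (fun kv => kv.2.length)).sum

lemma pvRem_nil (out : PySem.Set String) : pvRem [] out = 0 := rfl

lemma pvRem_cons (kv : String × List String) (rest : List (String × List String)) (out : PySem.Set String) :
    pvRem (kv :: rest) out = (if kv.1 ∈ out then 0 else kv.2.length) + pvRem rest out := by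
  by_cases h : kv.1 ∈ out <;> simp [pvRem, List.filter_cons, h]

lemma pvRem_empty (parents : List (String × List String)) :
    pvRem parents PySem.Set.empty = (parents.map (fun kv => kv.2.length)).sum := by
  induction parents with
  | nil => rfl
  | cons kv rest ih => simp [pvRem_cons, PySem.Set.empty]; exact ih

lemma pvRem_mono (parents : List (String × List String)) {out out' : PySem.Set String}
    (h : ∀ x ∈ out, x ∈ out') : pvRem parents out' ≤ pvRem parents out := by
  induction parents with
  | nil => exact le_refl _
  | cons kv rest ih =>
    simp only [pvRem_cons]
    by_cases h1 : kv.1 ∈ out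
    · simp [h1, h _ h1]; omega
    · by_cases h2 : kv.1 ∈ out' <;> simp [h1, h2] <;> omega

lemma pvRem_add (parents : List (String × List String)) {out : PySem.Set String} {n : String}
    (hn : n ∉ out) :
    pvRem parents (PySem.Set.add out n) + (pvGetPar parents n).length ≤ pvRem parents out := by
  induction parents with
  | nil => simp [pvRem_nil, pvGetPar]
  | cons kv rest ih =>
    obtain ⟨k, vs⟩ := kv
    simp only [pvRem_cons, pvGetPar]
    by_cases hk : k == n
    · have hkn : k = n := by simpa using hk
      have h1 : k ∈ PySem.Set.add out n := by
        rw [PySem.Set.mem_add]; right; exact hkn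
      have h2 : ¬ k ∈ out := hkn ▸ hn
      have := pvRem_mono rest (out := out) (out' := PySem.Set.add out n)
        (fun x hx => by rw [PySem.Set.mem_add]; left; exact hx)
      simp [hk, h1, h2]; omega
    · have hkn : k ≠ n := by simpa using hk
      have h1 : k ∈ PySem.Set.add out n ↔ k ∈ out := by
        rw [PySem.Set.mem_add]; simp [hkn]
      simp only [hk, if_false]
      by_cases h2 : k ∈ out <;> simp [h2, h1.mpr, h1, ih] <;> omega

lemma aLoop_post (parents : List (String × List String)) :
    ∀ (f : Nat) (out : PySem.Set String) (stack : List String),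
      stack.length + pvRem parents out ≤ f →
      out.Nodup →
      (∀ n ∈ out, ∀ p ∈ pvGetPar parents n, p ∈ out ∨ p ∈ stack) →
      (∀ x ∈ out, x ∈ ancestor_closureLoop parents f out stack) ∧
      (∀ x ∈ stack, x ∈ ancestor_closureLoop parents f out stack) ∧
      (ancestor_closureLoop parents f out stack).Nodup ∧
      pvClosed parents (ancestor_closureLoop parents f out stack) := by
  intro f
  induction f with
  | zero =>
    intro out stack hf hnd hinv
    have hstack : stack = [] := by
      cases stack with
      | nil => rfl
      | cons a t => simp at hf
    subst hstack
    simp only [ancestor_closureLoop]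
    exact ⟨fun x hx => hx, by simp, hnd, fun n hn p hp => by
      rcases hinv n hn p hp with h | h
      · exact h
      · simp at h⟩
  | succ f ih =>
    intro out stack hf hnd hinv
    cases stack with
    | nil =>
      simp only [ancestor_closureLoop]
      exact ⟨fun x hx => hx, by simp, hnd, fun n hn p hp => by
        rcases hinv n hn p hp with h | h
        · exact h
        · simp at h⟩
    | cons n rest =>
      simp only [ancestor_closureLoop]
      by_cases hmem : n ∈ out
      · have hc : PySem.Set.contains out n = true := by simp [hmem]
        rw [hc]; simp only [if_true]
        have hf' : rest.length + pvRem parents out ≤ f := by simp at hf; omega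
        have hinv' : ∀ m ∈ out, ∀ p ∈ pvGetPar parents m, p ∈ out ∨ p ∈ rest := by
          intro m hm p hp
          rcases hinv m hm p hp with h | h
          · exact Or.inl h
          · rcases List.mem_cons.mp h with h | h
            · exact Or.inl (h ▸ hmem)
            · exact Or.inr h
        obtain ⟨h1, h2, h3, h4⟩ := ih out rest hf' hnd hinv'
        exact ⟨h1, fun x hx => by
          rcases List.mem_cons.mp hx with h | h
          · exact h1 x (h ▸ hmem)
          · exact h2 x h, h3, h4⟩
      · have hc : PySem.Set.contains out n = false := by simp [hmem]
        rw [hc]; simp only [Bool.false_eq_true, if_false]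
        have hadd := pvRem_add parents (out := out) (n := n) hmem
        have hf' : ((pvGetPar parents n).reverse ++ rest).length +
            pvRem parents (PySem.Set.add out n) ≤ f := by
          simp at hf ⊢; omega
        have hnd' : (PySem.Set.add out n).Nodup := PySem.Set.nodup_add _ _ hnd
        have hinv' : ∀ m ∈ PySem.Set.add out n, ∀ p ∈ pvGetPar parents m,
            p ∈ PySem.Set.add out n ∨ p ∈ (pvGetPar parents n).reverse ++ rest := by
          intro m hm p hp
          rcases (PySem.Set.mem_add _ _ _).mp hm with hm | hm
          · rcases hinv m hm p hp with h | h
            · exact Or.inl ((PySem.Set.mem_add _ _ _).mpr (Or.inl h))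
            · rcases List.mem_cons.mp h with h | h
              · exact Or.inl ((PySem.Set.mem_add _ _ _).mpr (Or.inr h))
              · exact Or.inr (by simp [h])
          · subst hm; exact Or.inr (by simp [hp])
        obtain ⟨h1, h2, h3, h4⟩ := ih (PySem.Set.add out n) _ hf' hnd' hinv'
        refine ⟨fun x hx => h1 x ((PySem.Set.mem_add _ _ _).mpr (Or.inl hx)), fun x hx => ?_, h3, h4⟩
        rcases List.mem_cons.mp hx with h | h
        · exact h ▸ h1 n ((PySem.Set.mem_add _ _ _).mpr (Or.inr rfl))
        · exact h2 x (by simp [h])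

lemma aLoop_subset (parents : List (String × List String)) (S : List String)
    (hS : pvClosed parents S) :
    ∀ (f : Nat) (out : PySem.Set String) (stack : List String),
      (∀ x ∈ out, x ∈ S) → (∀ x ∈ stack, x ∈ S) →
      ∀ x ∈ ancestor_closureLoop parents f out stack, x ∈ S := by
  intro f
  induction f with
  | zero => intro out stack ho hs x hx; exact ho x hx
  | succ f ih =>
    intro out stack ho hs x hx
    cases stack with
    | nil => exact ho x hx
    | cons n rest =>
      simp only [ancestor_closureLoop] at hx
      by_cases hmem : n ∈ out
      · rw [show PySem.Set.contains out n = true by simp [hmem]] at hx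
        simp only [if_true] at hx
        exact ih out rest ho (fun y hy => hs y (List.mem_cons_of_mem _ hy)) x hx
      · rw [show PySem.Set.contains out n = false by simp [hmem]] at hx
        simp only [Bool.false_eq_true, if_false] at hx
        have hnS : n ∈ S := hs n List.mem_cons_self
        refine ih _ _ ?_ ?_ x hx
        · intro y hy
          rcases (PySem.Set.mem_add _ _ _).mp hy with h | h
          · exact ho y h
          · exact h ▸ hnS
        · intro y hy
          rcases List.mem_append.mp hy with h | h
          · exact hS n hnS y (List.mem_reverse.mp h)
          · exact hs y (List.mem_cons_of_mem _ h)

lemma pvGetPar_subset {parents : List (String × List String)} {n p : String}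
    (hp : p ∈ pvGetPar parents n) : p ∈ parents.flatMap (fun kv => kv.2) := by
  induction parents with
  | nil => simp [pvGetPar] at hp
  | cons kv rest ih =>
    obtain ⟨k, vs⟩ := kv
    simp only [pvGetPar] at hp
    by_cases h : k == n
    · simp [h] at hp; simp [hp]
    · simp [h] at hp; simp [ih hp]

lemma mem_pvStep (parents : List (String × List String)) (out : PySem.Set String) (x : String) :
    x ∈ pvStep parents out ↔ x ∈ out ∨ ∃ n ∈ out, x ∈ pvGetPar parents n := by
  simp [pvStep, PySem.Set.mem_union, PySem.Set.mem_ofList, List.mem_flatMap]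

lemma bFix_post (parents : List (String × List String)) (allL : List String)
    (hall : ∀ p ∈ parents.flatMap (fun kv => kv.2), p ∈ allL) :
    ∀ (f : Nat) (out : PySem.Set String),
      out.Nodup → (∀ x ∈ out, x ∈ allL) → allL.toFinset.card < f + out.length →
      (∀ x ∈ out, x ∈ ancestor_closureFix parents f out) ∧
      (ancestor_closureFix parents f out).Nodup ∧
      pvClosed parents (ancestor_closureFix parents f out) := by
  intro f
  induction f with
  | zero =>
    intro out hnd hsub hcard
    exfalso
    have h1 : out.length = out.toFinset.card := (List.toFinset_card_of_nodup hnd).symm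
    have h2 : out.toFinset ⊆ allL.toFinset := fun x hx =>
      List.mem_toFinset.mpr (hsub x (List.mem_toFinset.mp hx))
    have := Finset.card_le_card h2
    omega
  | succ f ih =>
    intro out hnd hsub hcard
    simp only [ancestor_closureFix]
    by_cases heq : PySem.Set.equal (pvStep parents out) out = true
    · rw [heq]; simp only [if_true]
      refine ⟨fun x hx => hx, hnd, fun n hn p hp => ?_⟩
      have : p ∈ pvStep parents out := (mem_pvStep _ _ _).mpr (Or.inr ⟨n, hn, hp⟩)
      exact ((PySem.Set.equal_iff _ _).mp heq p).mp this
    · rw [Bool.eq_false_iff.mpr heq]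
      simp only [Bool.false_eq_true, if_false]
      set nxt := pvStep parents out with hnxt
      have hmono : ∀ x ∈ out, x ∈ nxt := fun x hx => (mem_pvStep _ _ _).mpr (Or.inl hx)
      have hndn : nxt.Nodup := PySem.Set.nodup_union _ _ hnd
      have hsubn : ∀ x ∈ nxt, x ∈ allL := by
        intro x hx
        rcases (mem_pvStep _ _ _).mp hx with h | ⟨n, _, hp⟩
        · exact hsub x h
        · exact hall x (pvGetPar_subset hp)
      have hlen : out.length < nxt.length := by
        have hne : ∃ x ∈ nxt, x ∉ out := by
          by_contra hno
          push_neg at hno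
          exact heq ((PySem.Set.equal_iff _ _).mpr fun x => ⟨fun h => hno x h, fun h => hmono x h⟩)
        obtain ⟨x, hx, hxo⟩ := hne
        have h1 : out.toFinset ⊂ nxt.toFinset := by
          constructor
          · exact fun y hy => List.mem_toFinset.mpr (hmono y (List.mem_toFinset.mp hy))
          · intro hcon
            exact hxo (List.mem_toFinset.mp (hcon (List.mem_toFinset.mpr hx)))
        have := Finset.card_lt_card h1
        rw [List.toFinset_card_of_nodup hnd, List.toFinset_card_of_nodup hndn] at this
        exact this
      obtain ⟨h1, h2, h3⟩ := ih nxt hndn hsubn (by omega)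
      exact ⟨fun x hx => h1 x (hmono x hx), h2, h3⟩

lemma bFix_subset (parents : List (String × List String)) (S : List String)
    (hS : pvClosed parents S) :
    ∀ (f : Nat) (out : PySem.Set String),
      (∀ x ∈ out, x ∈ S) → ∀ x ∈ ancestor_closureFix parents f out, x ∈ S := by
  intro f
  induction f with
  | zero => intro out ho x hx; exact ho x hx
  | succ f ih =>
    intro out ho x hx
    simp only [ancestor_closureFix] at hx
    by_cases heq : PySem.Set.equal (pvStep parents out) out = true
    · rw [heq] at hx; simp only [if_true] at hx; exact ho x hx
    · rw [Bool.eq_false_iff.mpr heq] at hx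
      simp only [Bool.false_eq_true, if_false] at hx
      refine ih (pvStep parents out) ?_ x hx
      intro y hy
      rcases (mem_pvStep _ _ _).mp hy with h | ⟨n, hn, hp⟩
      · exact ho y h
      · exact hS n (ho n hn) y hp

-- ===== VERDICT (by name: the statement is the Claim_ definition above) =====
theorem ancestor_closure_spec : Claim_equal_ancestor_closure := by
  intro concept parents _
  unfold Spec_ancestor_closure
  unfold ancestor_closure ancestor_closure_alt
  set RA := ancestor_closureLoop parents ((parents.map (fun kv => kv.2.length)).sum + 2)
      PySem.Set.empty [concept] with hRA
  set allL := concept :: parents.flatMap (fun kv => kv.2) with hallL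
  set RB := ancestor_closureFix parents allL.length (PySem.Set.add PySem.Set.empty concept) with hRB
  have hinit : PySem.Set.add PySem.Set.empty concept = [concept] := rfl
  -- A-side postconditions
  have hA := aLoop_post parents ((parents.map (fun kv => kv.2.length)).sum + 2)
      PySem.Set.empty [concept]
      (by simp only [List.length_cons, List.length_nil]; rw [pvRem_empty]; omega)
      (by simp [PySem.Set.empty])
      (by simp [PySem.Set.empty])
  obtain ⟨-, hAstack, hAnd, hAclosed⟩ := hA
  have hAc : concept ∈ RA := hAstack concept (by simp)
  -- B-side postconditions
  have hB := bFix_post parents allL (fun p hp => by rw [hallL]; exact List.mem_cons_of_mem _ hp)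
      allL.length (PySem.Set.add PySem.Set.empty concept)
      (by rw [hinit]; simp)
      (by rw [hinit]; intro x hx; simp at hx; simp [hx, hallL])
      (by rw [hinit]; simp; exact allL.toFinset_card_le)
  obtain ⟨hBinit, hBnd, hBclosed⟩ := hB
  have hBc : concept ∈ RB := hBinit concept (by rw [hinit]; simp)
  -- mutual inclusion
  have hAB : ∀ x ∈ RA, x ∈ RB :=
    aLoop_subset parents RB hBclosed _ PySem.Set.empty [concept]
      (by simp [PySem.Set.empty]) (by simpa using hBc)
  have hBA : ∀ x ∈ RB, x ∈ RA :=
    bFix_subset parents RA hAclosed _ (PySem.Set.add PySem.Set.empty concept)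
      (by rw [hinit]; simpa using hAc)
  have hperm : RA.Perm RB :=
    (List.perm_ext_iff_of_nodup hAnd hBnd).mpr (fun a => ⟨hAB a, hBA a⟩)
  exact PySem.List.sorted_eq_sorted_of_perm RA RB (fun x => x) (fun a b h => h) hperm
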